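-- pv_equiv track=rewrite | github.com/p1mps/pipi | main.py | generate_tree
-- ===== SOURCE A (Python) =====
-- def generate_tree(message):
--     words = message.split()
--     triplets = []
--     words_pairs = []
--     tree = dict()
--     for i in range(0, len(words), 3):
--         triplets.append(tuple(words[i:i+3]))
--
--     for i in range(0, len(triplets)):
--         words_pairs.append(tuple(triplets[i:i+2]))
--
--     for pair in words_pairs:
--         first, *second = pair
--         values = tree.get(first, [])
--         tree.update({first: values + second or []})
--     return tree
-- ===== SOURCE B (Python) =====
-- def generate_tree(message):
--     words = message.split()
--     triplets = [tuple(words[i:i+3]) for i in range(0, len(words), 3)]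
--     succ_pairs = list(zip(triplets, triplets[1:]))
--     return {k: [b for a, b in succ_pairs if a == k]
--             for k in dict.fromkeys(triplets)}
-- ===== Notes on version B (the rewrite author's own statement) =====
-- stated objective: alternative
-- what changed: B replaces A's incremental get/update dict fold over a sliding pair-list by a staged per-key gather: dedupe the triplets for the key order, then build each key's value with one filter pass over the adjacent-pair list.
import Mathlib
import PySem

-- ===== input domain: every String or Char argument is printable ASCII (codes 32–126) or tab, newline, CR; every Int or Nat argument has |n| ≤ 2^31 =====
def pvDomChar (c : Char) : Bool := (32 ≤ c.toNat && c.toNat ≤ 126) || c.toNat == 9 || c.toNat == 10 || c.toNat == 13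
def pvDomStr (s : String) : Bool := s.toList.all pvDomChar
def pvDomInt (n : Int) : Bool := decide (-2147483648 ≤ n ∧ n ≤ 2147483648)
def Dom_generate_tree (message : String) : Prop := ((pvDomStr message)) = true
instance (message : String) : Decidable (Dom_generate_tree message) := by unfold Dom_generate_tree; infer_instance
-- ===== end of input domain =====

-- B replaces A's incremental get/update dict fold over a sliding pair-list by a staged per-key
-- gather: dedupe the triplets for the key order, then one filter pass per key (objective: alternative).

-- ===== PORT A =====
-- the dict's value is the list of successor triplets; returned as its items list
def generate_tree (message : String) : List (List String × List (List String)) :=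
  let words := PySem.Str.split₀ message
  let triplets := (PySem.List.pyRange 0 (PySem.List.len words) 3).foldl
      (fun acc i => acc ++ [PySem.List.slice words (some i) (some (i + 3))]) []
  let words_pairs := (PySem.List.pyRange 0 (PySem.List.len triplets) 1).foldl
      (fun acc i => acc ++ [PySem.List.slice triplets (some i) (some (i + 2))]) []
  let tree := words_pairs.foldl
      (fun (d : PySem.Dict (List String) (List (List String))) pair =>
        match pair with
        | [] => d  -- unreachable: every pair has length 1 or 2 ('first, *second' never fails here)
        | first :: second =>
          let values := d.getD first []
          let v := values ++ second
          d.insert first (if v = [] then [] else v))  -- 'values + second or []'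
      PySem.Dict.empty
  tree.items

-- ===== PORT B =====
def generate_tree_alt (message : String) : List (List String × List (List String)) :=
  let words := PySem.Str.split₀ message
  let triplets := (PySem.List.pyRange 0 (PySem.List.len words) 3).map
      (fun i => PySem.List.slice words (some i) (some (i + 3)))
  let succ_pairs := triplets.zip triplets.tail
  (PySem.List.dedup triplets).map
      (fun k => (k, (succ_pairs.filter (fun p => p.1 == k)).map (·.2)))

-- ===== PRECONDITION & SPEC =====
def Spec_generate_tree (message : String) (out : List (List String × List (List String))) : Prop := out = generate_tree_alt message
instance (message : String) (out : List (List String × List (List String))) : Decidable (Spec_generate_tree message out) := by unfold Spec_generate_tree; infer_instance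

-- ===== CLAIM (what is proved, stated in full; the proofs are below) =====
def Claim_equal_generate_tree : Prop := ∀ (message : String), Dom_generate_tree message → Spec_generate_tree message (generate_tree message)

-- ===== LEMMAS AND PROOFS =====

-- A's sliding window 'triplets[i:i+2]' as a structural recursion
def pvPairs : List (List String) → List (List (List String))
  | [] => []
  | [x] => [[x]]
  | x :: y :: rest => [x, y] :: pvPairs (y :: rest)

def pvAStep (d : PySem.Dict (List String) (List (List String))) (pair : List (List String)) :
    PySem.Dict (List String) (List (List String)) :=
  match pair with
  | [] => d
  | first :: second =>
    let values := d.getD first []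
    let v := values ++ second
    d.insert first (if v = [] then [] else v)

theorem pvPairs_eq (ts : List (List String)) :
    (List.range ts.length).map (fun i => (ts.drop i).take 2) = pvPairs ts := by
  induction ts using pvPairs.induct with
  | case1 => simp [pvPairs]
  | case2 x => simp [pvPairs]
  | case3 x y rest ih =>
      rw [pvPairs, ← ih]
      simp only [List.length_cons, List.range_succ_eq_map, List.map_cons, List.map_map]
      simp [Function.comp_def]

theorem pvPairs_ne_nil (ts : List (List String)) : ∀ p ∈ pvPairs ts, p ≠ [] := by
  induction ts using pvPairs.induct with
  | case1 => intro p hp; cases hp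
  | case2 x => intro p hp; simp [pvPairs] at hp; simp [hp]
  | case3 x y rest ih =>
      intro p hp
      rcases (by simpa [pvPairs] using hp : p = [x, y] ∨ p ∈ pvPairs (y :: rest)) with h | h
      · simp [h]
      · exact ih p h

theorem pvAStep_eq_modify (d : PySem.Dict (List String) (List (List String)))
    (p : List (List String)) (hp : p ≠ []) :
    pvAStep d p = d.modify (p.headD []) [] (· ++ p.tail) := by
  match p, hp with
  | first :: second, _ =>
      show d.insert first (if d.getD first [] ++ second = [] then [] else d.getD first [] ++ second)
        = d.insert first (d.getD first [] ++ second)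
      rcases eq_or_ne (d.getD first [] ++ second) [] with h | h
      · rw [if_pos h, h]
      · rw [if_neg h]

theorem pvHeads (ts : List (List String)) :
    (pvPairs ts).map (fun p => p.headD []) = ts := by
  induction ts using pvPairs.induct with
  | case1 => rfl
  | case2 x => rfl
  | case3 x y rest ih => simp only [pvPairs, List.map_cons, ih]; rfl

-- my own grouping fold fact: like PySem.Dict.getD_foldl_modify_append, but the step appends a LIST
theorem pvGetDFold (qs : List (List String × List (List String)))
    (k : List String) :
    ∀ (d : PySem.Dict (List String) (List (List String))),
    (qs.foldl (fun d q => d.modify q.1 [] (· ++ q.2)) d).getD k []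
      = d.getD k [] ++ (qs.filter (fun q => q.1 == k)).flatMap (·.2) := by
  induction qs with
  | nil => intro d; simp
  | cons q rest ih =>
      intro d
      rw [List.foldl_cons, ih, PySem.Dict.getD_modify, List.filter_cons]
      by_cases h : q.1 = k
      · subst h; simp [List.append_assoc]
      · simp [h, Ne.symm h]

theorem pvGatherEq (ts : List (List String)) (k : List String) :
    (((pvPairs ts).map (fun p => (p.headD ([] : List String), p.tail))).filter
        (fun q => q.1 == k)).flatMap (·.2)
      = ((ts.zip ts.tail).filter (fun p => p.1 == k)).map (·.2) := by
  induction ts using pvPairs.induct with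
  | case1 => rfl
  | case2 x =>
      by_cases h : x = k <;> simp [pvPairs, h]
  | case3 x y rest ih =>
      simp only [List.tail_cons, List.headD_eq_head?] at ih
      by_cases h : x = k <;>
        simp [pvPairs, h, ih]

theorem pvItemsEq (d : PySem.Dict (List String) (List (List String)))
    (hnd : d.keys.Nodup) :
    d.items = d.keys.map (fun k => (k, d.getD k [])) := by
  have : d.keys.map (fun k => (k, d.getD k [])) = d.items.map (fun p => (p.1, d.getD p.1 [])) := by
    simp only [PySem.Dict.keys, List.map_map]; rfl
  rw [this]
  conv_lhs => rw [show d.items = d.items.map id from (List.map_id d.items).symm]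
  apply List.map_congr_left
  intro p hp
  have := PySem.Dict.getD_of_mem_items (d := d) (k := p.1) (v := p.2) (d0 := [])
    (by simpa using hp) hnd
  simp [this]

-- ===== VERDICT (by name: the statement is the Claim_ definition above) =====
theorem generate_tree_spec : Claim_equal_generate_tree := by
  intro message _
  unfold Spec_generate_tree generate_tree generate_tree_alt
  simp only [PySem.List.foldl_append_singleton_eq_map, List.nil_append, PySem.List.len_eq]
  set words := PySem.Str.split₀ message with hwords
  set ts := (PySem.List.pyRange 0 ((words.length : Int)) 3).map
    (fun i => PySem.List.slice words (some i) (some (i + 3))) with hts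
  rw [PySem.List.pyRange_zero_natCast ts.length, List.map_map]
  have hpairs : (List.range ts.length).map
      ((fun i => PySem.List.slice ts (some i) (some (i + 2))) ∘ (fun k : Nat => (k : Int))) =
      pvPairs ts := by
    rw [← pvPairs_eq ts]
    apply List.map_congr_left
    intro k _
    have h := PySem.List.slice_natCast_add ts k 2
    simpa using h
  rw [hpairs]
  have hcongr : (pvPairs ts).foldl pvAStep PySem.Dict.empty
      = (pvPairs ts).foldl (fun d p => d.modify (p.headD []) [] (· ++ p.tail)) PySem.Dict.empty :=
    PySem.List.foldl_congr_mem _ _ _ _ (fun d p hp => pvAStep_eq_modify d p (pvPairs_ne_nil ts p hp))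
  have hmap : (pvPairs ts).foldl (fun d p => d.modify (p.headD []) [] (· ++ p.tail)) PySem.Dict.empty
      = ((pvPairs ts).map (fun p => (p.headD ([] : List String), p.tail))).foldl
          (fun d q => d.modify q.1 [] (· ++ q.2)) PySem.Dict.empty := by
    rw [List.foldl_map]
  show ((pvPairs ts).foldl pvAStep PySem.Dict.empty).items = _
  rw [hcongr, hmap]
  set qs := (pvPairs ts).map (fun p => (p.headD ([] : List String), p.tail)) with hqs
  set D := qs.foldl (fun d q => d.modify q.1 [] (· ++ q.2)) PySem.Dict.empty with hD
  have hkeys : D.keys = PySem.Set.ofList ts := by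
    rw [hD, PySem.Dict.keys_foldl_modify_key qs Prod.fst [] (fun _ q v => v ++ q.2)]
    rw [PySem.Dict.keys_empty]
    show PySem.Set.ofList (qs.map Prod.fst) = PySem.Set.ofList ts
    rw [hqs, List.map_map]
    congr 1
    exact pvHeads ts
  have hnd : D.keys.Nodup := by
    rw [hkeys]; exact PySem.Set.nodup_ofList ts
  rw [pvItemsEq D hnd, hkeys, PySem.List.dedup_eq_ofList]
  apply List.map_congr_left
  intro k _
  have hg : D.getD k [] = (qs.filter (fun q => q.1 == k)).flatMap (·.2) := by
    rw [hD, pvGetDFold]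
    simp
  rw [hg, hqs, pvGatherEq]
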